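-- pv_equiv track=rewrite | github.com/EastSunrise/tools-flask | tools/utils/common.py | cmp_strings
-- ===== SOURCE A (Python) =====
-- def cmp_strings(strings: list):
--     """
--     compare at least 2 strings with same length.
--     :return: list of common parts, lists of different parts for string in strings separately
--         For example, ['abc02lkj', 'abd04kjj']
--         return ['ab', '0', 'j'], [['c', '2lk'], ['d', '4kj']]
--     """
--     if strings is None or len(strings) < 2 or any((x is None or len(x) == 0 or len(x) != len(strings[0])) for x in strings):
--         raise ValueError
--     commons = ['']
--     diff = [[] for i in range(len(strings))]
--     last_common = True
--     first_str: str = strings[0]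
--     for i in range(len(first_str)):
--         if any(x[i] != first_str[i] for x in strings):
--             if last_common:
--                 for d in diff:
--                     d.append('')
--                 last_common = False
--             for j, d in enumerate(diff):
--                 d[-1] += strings[j][i]
--         else:
--             if not last_common:
--                 commons.append('')
--                 last_common = True
--             commons[-1] += first_str[i]
--     return commons, diff
-- ===== SOURCE B (Python) =====
-- from itertools import groupby
--
--
-- def cmp_strings(strings: list):
--     if strings is None or len(strings) < 2 or any((x is None or len(x) == 0 or len(x) != len(strings[0])) for x in strings):
--         raise ValueError
--     first = strings[0]
--     match = [all(s[i] == first[i] for s in strings) for i in range(len(first))]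
--     runs = [(flag, list(grp)) for flag, grp in groupby(range(len(first)), key=lambda i: match[i])]
--     commons = [''.join(first[i] for i in idxs) for flag, idxs in runs if flag]
--     if not runs or not runs[0][0]:
--         commons = [''] + commons
--     diff = [[''.join(s[i] for i in idxs) for flag, idxs in runs if not flag] for s in strings]
--     return commons, diff
-- ===== Notes on version B (the rewrite author's own statement) =====
-- stated objective: alternative
-- what changed: B replaces A's single stateful loop with mutable commons/diff/last_common state by first computing a per-column boolean match vector, segmenting it into maximal runs with itertools.groupby, and joining each run's characters per string (prepending the '' sentinel when the first run differs), keeping A's identical ValueError guard.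
import Mathlib
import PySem

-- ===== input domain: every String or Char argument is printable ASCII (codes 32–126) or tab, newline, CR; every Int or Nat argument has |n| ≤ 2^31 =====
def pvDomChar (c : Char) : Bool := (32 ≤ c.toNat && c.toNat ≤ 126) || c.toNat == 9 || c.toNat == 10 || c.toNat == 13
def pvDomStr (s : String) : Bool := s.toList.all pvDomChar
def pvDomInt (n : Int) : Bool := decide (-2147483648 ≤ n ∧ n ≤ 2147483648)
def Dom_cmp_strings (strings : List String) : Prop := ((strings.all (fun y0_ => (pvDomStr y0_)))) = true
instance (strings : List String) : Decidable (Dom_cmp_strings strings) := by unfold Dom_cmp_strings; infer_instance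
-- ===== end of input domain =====

-- B replaces A's single stateful loop (commons/diff/last_common) by a match-vector segmented
-- into maximal runs (itertools.groupby) that are then joined per run; objective: alternative.

-- ===== PORT A =====
-- commons[-1] += s  /  d[-1] += s
def pvAppendLast (l : List String) (s : String) : List String :=
  l.dropLast ++ [l.getLastD "" ++ s]

-- one iteration of A's for-loop; state = (commons, diff, last_common).
-- x[i] is ported as x.toList.getD i ' ': exact because the loop only runs on inputs that
-- passed the guard (Pre_), where all strings have length len(first) and i < len(first).
def pvStepA (strings : List String) (first : List Char)
    (st : List String × List (List String) × Bool) (i : Nat) :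
    List String × List (List String) × Bool :=
  if strings.any (fun x => !(x.toList.getD i ' ' == first.getD i ' ')) then
    let diff1 := if st.2.2 then st.2.1.map (fun d => d ++ [""]) else st.2.1
    (st.1, (strings.zip diff1).map (fun p => pvAppendLast p.2 (String.ofList [p.1.toList.getD i ' '])), false)
  else
    let commons1 := if st.2.2 then st.1 else st.1 ++ [""]
    (pvAppendLast commons1 (String.ofList [first.getD i ' ']), st.2.1, true)

def cmp_strings (strings : List String) : List String × List (List String) :=
  let first := (strings.headD "").toList
  let st := (List.range first.length).foldl (pvStepA strings first)
      ([""], strings.map (fun _ => ([] : List String)), true)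
  (st.1, st.2.1)

-- ===== PORT B =====
-- itertools.groupby step: extend the last run if the key is unchanged, else open a new run
def pvRunsStep (runs : List (Bool × List Nat)) (f : Bool) (i : Nat) : List (Bool × List Nat) :=
  match runs.getLast? with
  | some r => if r.1 == f then runs.dropLast ++ [(r.1, r.2 ++ [i])] else runs ++ [(f, [i])]
  | none => [(f, [i])]

-- the two comprehensions of Source B (commons includes the leading-'' rule)
def pvCommonsOf (first : List Char) (runs : List (Bool × List Nat)) : List String :=
  let c0 := runs.filterMap (fun r => if r.1 then some (String.ofList (r.2.map (fun i => first.getD i ' '))) else none)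
  if (runs.headD (false, [])).1 then c0 else "" :: c0

def pvDiffOf (strings : List String) (runs : List (Bool × List Nat)) : List (List String) :=
  strings.map (fun s => runs.filterMap (fun r => if r.1 then none else some (String.ofList (r.2.map (fun i => s.toList.getD i ' ')))))

def cmp_strings_alt (strings : List String) : List String × List (List String) :=
  let first := (strings.headD "").toList
  let matchv := (List.range first.length).map (fun i => strings.all (fun s => s.toList.getD i ' ' == first.getD i ' '))
  let runs := (List.range first.length).foldl (fun rs i => pvRunsStep rs (matchv.getD i false) i) []
  (pvCommonsOf first runs, pvDiffOf strings runs)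

-- ===== PRECONDITION & SPEC =====
-- Pre_ excludes exactly the inputs on which A's up-front guard raises ValueError
-- (fewer than two strings, an empty string, or strings of unequal length); B raises there too.
def Pre_cmp_strings (strings : List String) : Prop :=
  2 ≤ strings.length ∧
    ∀ s ∈ strings, s.toList ≠ [] ∧ s.toList.length = (strings.headD "").toList.length
instance (strings : List String) : Decidable (Pre_cmp_strings strings) := by
  unfold Pre_cmp_strings; infer_instance

def pvWitness_cmp_strings : List String := ["abc02lkj", "abd04kjj"]

def Spec_cmp_strings (strings : List String) (out : List String × List (List String)) : Prop := out = cmp_strings_alt strings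
instance (strings : List String) (out : List String × List (List String)) : Decidable (Spec_cmp_strings strings out) := by unfold Spec_cmp_strings; infer_instance

-- ===== CLAIM (what is proved, stated in full; the proofs are below) =====
def Claim_equal_cmp_strings : Prop := ∀ (strings : List String), Dom_cmp_strings strings → Pre_cmp_strings strings → Spec_cmp_strings strings (cmp_strings strings)

-- ===== LEMMAS AND PROOFS =====

-- A's running state (commons, diff, last_common), read off from B's run list
def pvAssemble (strings : List String) (first : List Char) (runs : List (Bool × List Nat)) :
    List String × List (List String) × Bool :=
  (pvCommonsOf first runs, pvDiffOf strings runs, (runs.getLastD (true, [])).1)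

lemma pv_any_not_all {α : Type} (l : List α) (p : α → Bool) :
    l.any (fun x => !(p x)) = !l.all p := by
  rw [List.all_eq_not_any_not, Bool.not_not]
lemma pv_zip_self_map {α β : Type} (l : List α) (g : α → β) :
    l.zip (l.map g) = l.map (fun a => (a, g a)) := by
  induction l with
  | nil => rfl
  | cons a t ih => simp [ih]
lemma pv_appendLast_concat (l : List String) (a s : String) :
    pvAppendLast (l ++ [a]) s = l ++ [a ++ s] := by
  simp [pvAppendLast]
lemma pv_map_zip_replicate {α β γ : Type} (l : List α) (a : β) (F : α × β → γ) :
    (l.zip (List.replicate l.length a)).map F = l.map (fun x => F (x, a)) := by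
  induction l with
  | nil => rfl
  | cons x t ih => simp [List.replicate_succ, ih]

lemma pv_headD_app (rs ys zs : List (Bool × List Nat)) (d : Bool × List Nat)
    (h : (ys.headD d).1 = (zs.headD d).1) :
    ((rs ++ ys).headD d).1 = ((rs ++ zs).headD d).1 := by
  cases rs <;> simp_all

lemma pv_appendLast_cons_concat (x : String) (l : List String) (a s : String) :
    pvAppendLast (x :: (l ++ [a])) s = x :: (l ++ [a ++ s]) := by
  have hx : x :: (l ++ [a]) = (x :: l) ++ [a] := by simp
  rw [hx, pv_appendLast_concat]; simp

lemma pv_step_eq (strings : List String) (first : List Char) (i : Nat)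
    (runs : List (Bool × List Nat)) :
    pvStepA strings first (pvAssemble strings first runs) i =
      pvAssemble strings first
        (pvRunsStep runs (strings.all (fun s => s.toList.getD i ' ' == first.getD i ' ')) i) := by
  unfold pvStepA
  rw [pv_any_not_all]
  rcases runs.eq_nil_or_concat with rfl | ⟨rs, ⟨rf, ridx⟩, rfl⟩
  · cases h : strings.all (fun s => s.toList.getD i ' ' == first.getD i ' ') <;>
      unfold pvRunsStep pvAssemble pvCommonsOf pvDiffOf <;>
      simp [pv_map_zip_replicate, pvAppendLast]
  · simp only [List.concat_eq_append]
    have hgl : ∀ (y d : Bool × List Nat), ((rs ++ [y]).getLastD d) = y := by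
      intro y d; simp
    have hgl2 : ∀ (y z d : Bool × List Nat), ((rs ++ [y, z]).getLastD d) = z := by
      intro y z d
      have h2 : rs ++ [y, z] = (rs ++ [y]) ++ [z] := by simp
      rw [h2]; simp
    have hdl : ∀ (y : Bool × List Nat), (rs ++ [y]).dropLast = rs := by
      intro y; simp
    have hlast : ∀ (y : Bool × List Nat), (rs ++ [y]).getLast? = some y := by
      intro y; simp
    cases h : strings.all (fun s => s.toList.getD i ' ' == first.getD i ' ') <;> cases rf <;>
      unfold pvRunsStep pvAssemble pvDiffOf pvCommonsOf <;>
      simp only [hlast, hgl, hdl, h, Bool.not_false, Bool.not_true, Bool.false_eq_true,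
        Bool.true_eq_false, ite_true, ite_false, beq_self_eq_true, Bool.false_beq, Bool.true_beq,
        List.nil_append, Prod.mk.injEq, List.filterMap_append,
        List.filterMap_cons, List.filterMap_nil, List.append_nil, List.append_assoc,
        List.singleton_append]
    case inr.false.false =>
      refine ⟨?_, ?_, by simp [hgl, hgl2]⟩
      · rw [pv_headD_app rs [(false, ridx)] [(false, ridx ++ [i])] (false, []) (by simp)]
      · rw [pv_zip_self_map, List.map_map]
        apply List.map_congr_left; intro s _
        simp [pv_appendLast_concat]
    case inr.false.true =>
      refine ⟨?_, ?_, by simp [hgl, hgl2]⟩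
      · rw [pv_headD_app rs [(true, ridx), (false, [i])] [(true, ridx)] (false, []) (by simp)]
      · rw [List.map_map, pv_zip_self_map, List.map_map]
        apply List.map_congr_left; intro s _
        simp [pv_appendLast_concat]
    case inr.true.false =>
      refine ⟨?_, trivial, by simp [hgl, hgl2]⟩
      rw [pv_headD_app rs [(false, ridx), (true, [i])] [(false, ridx)] (false, []) (by simp)]
      cases hh : ((rs ++ [((false : Bool), ridx)]).headD (false, [])).1 <;>
        simp [pv_appendLast_concat, pv_appendLast_cons_concat]
    case inr.true.true =>
      refine ⟨?_, trivial⟩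
      rw [pv_headD_app rs [(true, ridx ++ [i])] [(true, ridx)] (false, []) (by simp)]
      cases hh : ((rs ++ [((true : Bool), ridx)]).headD (false, [])).1 <;>
        simp [pv_appendLast_concat, pv_appendLast_cons_concat]

lemma pv_main (strings : List String) (first : List Char) (n : Nat) :
    (List.range n).foldl (pvStepA strings first)
        ([""], strings.map (fun _ => ([] : List String)), true) =
      pvAssemble strings first
        ((List.range n).foldl
          (fun rs i => pvRunsStep rs (strings.all (fun s => s.toList.getD i ' ' == first.getD i ' ')) i)
          []) := by
  induction n with
  | zero => simp [pvAssemble, pvCommonsOf, pvDiffOf]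
  | succ m ih =>
      rw [List.range_succ, List.foldl_append, List.foldl_append, ih]
      simpa using pv_step_eq strings first m _

lemma pv_matchv_getD (strings : List String) (first : List Char) (n i : Nat) (hi : i < n) :
    ((List.range n).map (fun j => strings.all (fun s => s.toList.getD j ' ' == first.getD j ' '))).getD i false
      = strings.all (fun s => s.toList.getD i ' ' == first.getD i ' ') := by
  rw [List.getD_eq_getElem?_getD]
  simp [hi]

lemma pv_eq_all (strings : List String) : cmp_strings strings = cmp_strings_alt strings := by
  unfold cmp_strings cmp_strings_alt
  dsimp only
  rw [pv_main strings ((strings.headD "").toList) ((strings.headD "").toList.length)]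
  have hc : (List.range ((strings.headD "").toList.length)).foldl
      (fun rs i => pvRunsStep rs
        (((List.range ((strings.headD "").toList.length)).map
          (fun j => strings.all (fun s => s.toList.getD j ' ' == (strings.headD "").toList.getD j ' '))).getD i false) i) [] =
      (List.range ((strings.headD "").toList.length)).foldl
      (fun rs i => pvRunsStep rs (strings.all (fun s => s.toList.getD i ' ' == (strings.headD "").toList.getD i ' ')) i) [] := by
    apply PySem.List.foldl_congr_mem
    intro rs i hi
    rw [pv_matchv_getD strings _ _ i (List.mem_range.mp hi)]
  rw [hc]
  rfl

-- ===== VERDICT (by name: the statement is the Claim_ definition above) =====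
theorem cmp_strings_spec : Claim_equal_cmp_strings := by
  intro strings _ _
  unfold Spec_cmp_strings
  exact pv_eq_all strings
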